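-- pv_equiv track=rewrite | github.com/mauranolab/mapping | bak.DeDupScript/OriginalDeDup.py | dedup_dir_adj
-- ===== SOURCE A (Python) =====
-- def edit_dist(first, second):
--     ''' returns the edit distance/hamming distances between
--     its two arguements '''
--     dist = sum([not a == b for a, b in zip(first, second)])
--     return dist
--
-- def breadth_first_search(node, adj_list):
--     searched = set()
--     found = set()
--     queue = set()
--     queue.update((node,))
--     found.update((node,))
--
--     while len(queue)>0:
--         node=(list(queue))[0]
--         found.update(adj_list[node])
--         queue.update(adj_list[node])
--         searched.update((node,))
--         queue.difference_update(searched)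
--
--     return found
--
-- def dedup_dir_adj(Counter):
--     def get_adj_list_directional_adjacency(umis, counts):
--         return {umi: [umi2 for umi2 in umis if edit_dist(umi, umi2) == 1 and
--                       counts[umi] >= (counts[umi2]*2)-1] for umi in umis}
--     def get_connected_components_adjacency(graph, Counter):
--         found = list()
--         components = list()
--         for node in sorted(graph, key=lambda x: Counter[x], reverse=True):
--             if node not in found:
--                 component = breadth_first_search(node, graph)
--                 found.extend(component)
--                 components.append(component)
--         return components
--     def remove_umis(adj_list, cluster, nodes):
--         '''removes the specified nodes from the cluster and returns
--         the remaining nodes '''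
--         # list incomprehension: for x in nodes: for node in adj_list[x]: yield node
--         nodes_to_remove = set([node
--                                for x in nodes
--                                for node in adj_list[x]] + nodes)
--         return cluster - nodes_to_remove
--     def reduce_clusters_directional_adjacency(adj_list, clusters, counts):
--         n = 0
--         for cluster in clusters:
--             n+=1
--         return n
--     adj_list = get_adj_list_directional_adjacency(Counter.keys(), Counter)
--     clusters = get_connected_components_adjacency(adj_list, Counter)
--     count = reduce_clusters_directional_adjacency(adj_list, clusters, Counter)
--     return clusters
--     return count
--     return adj_list
-- ===== SOURCE B (Python) =====
-- def dedup_dir_adj(Counter):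
--     umis = list(Counter)
--
--     def near(u, v):
--         return (sum(a != b for a, b in zip(u, v)) == 1
--                 and Counter[u] >= Counter[v] * 2 - 1)
--
--     # all-pairs reachability via Warshall's transitive-closure DP (no graph search)
--     reach = {u: {u} | {v for v in umis if near(u, v)} for u in umis}
--     for k in umis:
--         rk = reach[k]
--         for u in umis:
--             if k in reach[u]:
--                 reach[u] = reach[u] | rk
--
--     found = set()
--     components = []
--     for seed in sorted(umis, key=Counter.get, reverse=True):
--         if seed not in found:
--             comp = reach[seed]
--             found |= comp
--             components.append(comp)
--     return components
-- ===== Notes on version B (the rewrite author's own statement) =====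
-- stated objective: alternative
-- what changed: A builds an adjacency dict and runs a per-seed breadth-first search (queue/searched/found sets) to flood each component; B runs no graph search at all: it computes all-pairs reachability with Warshall's transitive-closure dynamic program over the whole UMI set and then reads each component directly off the closure row of its seed.
import Mathlib
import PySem

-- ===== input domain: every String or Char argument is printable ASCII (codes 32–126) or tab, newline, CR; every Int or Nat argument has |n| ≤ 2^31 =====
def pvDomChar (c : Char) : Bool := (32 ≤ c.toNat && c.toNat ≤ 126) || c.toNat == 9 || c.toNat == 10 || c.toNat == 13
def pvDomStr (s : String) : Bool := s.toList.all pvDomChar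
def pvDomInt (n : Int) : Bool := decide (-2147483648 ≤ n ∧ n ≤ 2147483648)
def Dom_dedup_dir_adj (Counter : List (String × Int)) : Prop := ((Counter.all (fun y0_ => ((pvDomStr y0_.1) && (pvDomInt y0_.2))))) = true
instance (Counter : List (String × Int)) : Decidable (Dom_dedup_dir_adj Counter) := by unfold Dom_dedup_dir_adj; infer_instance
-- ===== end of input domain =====

-- B replaces A's per-seed BFS over a precomputed adjacency dict by Warshall's all-pairs
-- transitive-closure dynamic program, from which each component is read off directly
-- (objective: alternative; return value only — both Pythons return a list of sets, whose
-- unmodelled iteration order both ports represent canonically in key order).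

-- ===== PORT A =====
-- edit_dist: sum of booleans over zip
def pyEditDist (first second : String) : Int :=
  ((first.toList.zip second.toList).map (fun p => if p.1 = p.2 then (0 : Int) else 1)).sum

-- the adjacency predicate of A's dict comprehension
def aAdjPred (d : PySem.Dict String Int) (u v : String) : Bool :=
  decide (pyEditDist u v = 1) && decide (d.getD v 0 * 2 - 1 ≤ d.getD u 0)

-- A's while-loop (fuel is only a totality guard; the caller passes enough)
def bfsLoop (adj : PySem.Dict String (List String)) :
    Nat → PySem.Set String → PySem.Set String → PySem.Set String → PySem.Set String
  | 0, _, found, _ => found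
  | fuel+1, searched, found, queue =>
    match queue with
    | [] => found
    | node :: _ =>
      -- node = (list(queue))[0]; the resulting SET does not depend on which element is taken
      let nbrs := adj.getD node []
      bfsLoop adj fuel (PySem.Set.add searched node) (PySem.Set.update found nbrs)
        (PySem.Set.diff (PySem.Set.update queue nbrs) (PySem.Set.add searched node))

def breadth_first_search (node : String) (adj : PySem.Dict String (List String)) (fuel : Nat) :
    PySem.Set String :=
  bfsLoop adj fuel PySem.Set.empty (PySem.Set.add PySem.Set.empty node)
    (PySem.Set.add PySem.Set.empty node)

def dedup_dir_adj (Counter : List (String × Int)) : List (List String) :=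
  let d : PySem.Dict String Int := PySem.Dict.ofList Counter
  let umis := d.keys
  let adj : PySem.Dict String (List String) :=
    umis.foldl (fun g u => g.insert u (umis.filter (fun v => aAdjPred d u v))) PySem.Dict.empty
  let nodes := PySem.List.sorted adj.keys (fun x => d.getD x 0) true
  let res := nodes.foldl
    (fun (acc : List (List String) × PySem.Set String) node =>
      if node ∈ acc.2 then acc
      else
        let component := breadth_first_search node adj (umis.length + 1)
        -- the Python appends the SET component; its iteration order is not modelled, so the
        -- set value is represented canonically in key order
        (acc.1 ++ [umis.filter (fun x => decide (x ∈ component))],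
         PySem.Set.update acc.2 component))
    ([], PySem.Set.empty)
  res.1

-- ===== PORT B =====
-- near(u, v): sum of boolean mismatches over zip equals 1, plus the directional count test
def bNear (d : PySem.Dict String Int) (u v : String) : Bool :=
  ((u.toList.zip v.toList).countP (fun p => p.1 != p.2) == 1) &&
    decide (d.getD v 0 * 2 - 1 ≤ d.getD u 0)

-- the initial matrix rows: reach[u] = {u} | {v for v in umis if near(u, v)}
def bInit (d : PySem.Dict String Int) (umis : List String) : PySem.Dict String (PySem.Set String) :=
  umis.foldl
    (fun g u => g.insert u (PySem.Set.union (PySem.Set.add PySem.Set.empty u)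
      (PySem.Set.ofList (umis.filter (fun v => bNear d u v)))))
    PySem.Dict.empty

-- Warshall's inner loop: for u in umis: if k in reach[u]: reach[u] = reach[u] | rk
def bInner (umis : List String) (k : String) (rk : PySem.Set String)
    (r : PySem.Dict String (PySem.Set String)) : PySem.Dict String (PySem.Set String) :=
  umis.foldl
    (fun r u =>
      if k ∈ r.getD u PySem.Set.empty then
        r.insert u (PySem.Set.union (r.getD u PySem.Set.empty) rk)
      else r)
    r

def dedup_dir_adj_alt (Counter : List (String × Int)) : List (List String) :=
  let d : PySem.Dict String Int := PySem.Dict.ofList Counter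
  let umis := d.keys
  let reach := umis.foldl (fun r k => bInner umis k (r.getD k PySem.Set.empty) r) (bInit d umis)
  let nodes := PySem.List.sorted umis (fun x => d.getD x 0) true
  let res := nodes.foldl
    (fun (acc : List (List String) × PySem.Set String) seed =>
      if seed ∈ acc.2 then acc
      else
        let comp := reach.getD seed PySem.Set.empty
        -- the set value is represented canonically in key order (see port A)
        (acc.1 ++ [umis.filter (fun x => decide (x ∈ comp))], PySem.Set.update acc.2 comp))
    ([], PySem.Set.empty)
  res.1

-- ===== PRECONDITION & SPEC =====
def Spec_dedup_dir_adj (Counter : List (String × Int)) (out : List (List String)) : Prop := out = dedup_dir_adj_alt Counter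
instance (Counter : List (String × Int)) (out : List (List String)) : Decidable (Spec_dedup_dir_adj Counter out) := by unfold Spec_dedup_dir_adj; infer_instance

-- ===== CLAIM (what is proved, stated in full; the proofs are below) =====
def Claim_equal_dedup_dir_adj : Prop := ∀ (Counter : List (String × Int)), Dom_dedup_dir_adj Counter → Spec_dedup_dir_adj Counter (dedup_dir_adj Counter)

-- ===== LEMMAS AND PROOFS =====

-- reachability in the neighbour graph
def ReachN (N : String → List String) (a b : String) : Prop :=
  Relation.ReflTransGen (fun x y => y ∈ N x) a b

-- paths whose interior vertices all lie in K
inductive WP (E : String → String → Prop) (K : List String) : String → String → Prop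
  | refl : ∀ u, WP E K u u
  | last : ∀ u v, E u v → WP E K u v
  | cons : ∀ u w v, E u w → w ∈ K → WP E K w v → WP E K u v

theorem pyEditDist_eq_countP (u v : String) :
    pyEditDist u v = ((u.toList.zip v.toList).countP (fun p => decide (¬ p.1 = p.2)) : Int) := by
  unfold pyEditDist
  induction u.toList.zip v.toList with
  | nil => simp
  | cons p rest ih =>
    by_cases h : p.1 = p.2
    · simp [h, ih]
    · simp [h, ih]; omega

-- the two edge predicates agree
theorem bNear_eq_aAdjPred (d : PySem.Dict String Int) (u v : String) :
    bNear d u v = aAdjPred d u v := by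
  unfold bNear aAdjPred
  congr 1
  rw [Bool.eq_iff_iff]
  simp only [beq_iff_eq, decide_eq_true_eq, pyEditDist_eq_countP]
  have : (fun p : Char × Char => p.1 != p.2) = (fun p : Char × Char => decide (¬ p.1 = p.2)) := by
    funext p; by_cases h : p.1 = p.2 <;> simp [h]
  rw [this]
  exact ⟨fun h => by exact_mod_cast h, fun h => by exact_mod_cast h⟩

-- lookups in a fold-built dict over distinct keys
theorem getD_foldl_insert_not_mem {α : Type} (f : String → α) (dflt : α) (l : List String) :
    ∀ (g : PySem.Dict String α) (u : String), u ∉ l →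
    (l.foldl (fun g x => g.insert x (f x)) g).getD u dflt = g.getD u dflt := by
  induction l with
  | nil => intro g u _; rfl
  | cons x rest ih =>
    intro g u h
    simp only [List.mem_cons, not_or] at h
    rw [List.foldl_cons, ih _ u h.2, PySem.Dict.getD_insert_of_ne (hne := h.1)]

theorem getD_foldl_insert_mem {α : Type} (f : String → α) (dflt : α) (l : List String) :
    ∀ (g : PySem.Dict String α) (u : String), l.Nodup → u ∈ l →
    (l.foldl (fun g x => g.insert x (f x)) g).getD u dflt = f u := by
  induction l with
  | nil => intro g u _ h; simp at h
  | cons x rest ih =>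
    intro g u hnd h
    simp only [List.nodup_cons] at hnd
    rcases List.mem_cons.mp h with rfl | h2
    · rw [List.foldl_cons, getD_foldl_insert_not_mem f dflt rest _ u hnd.1,
        PySem.Dict.getD_insert_self]
    · exact ih _ u hnd.2 h2

-- BFS invariant: A's loop computes exactly the reachable set
theorem bfsLoop_mem (adj : PySem.Dict String (List String)) (N : String → List String)
    (umis : List String) (hadj : ∀ u ∈ umis, adj.getD u [] = N u)
    (hNsub : ∀ u, ∀ v ∈ N u, v ∈ umis) (start : String) :
    ∀ (fuel : Nat) (searched found queue : PySem.Set String),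
    searched.Nodup →
    (∀ x ∈ searched, x ∈ umis) → (∀ x ∈ queue, x ∈ umis) →
    (∀ x ∈ searched, x ∉ queue) →
    (∀ x ∈ found, ReachN N start x) →
    start ∈ found →
    (∀ x ∈ found, x ∈ searched ∨ x ∈ queue) →
    (∀ x, (x ∈ searched ∨ x ∈ queue) → x ∈ found) →
    (∀ x ∈ searched, ∀ y ∈ N x, y ∈ found) →
    umis.length + 1 ≤ fuel + searched.length →
    ∀ x, x ∈ bfsLoop adj fuel searched found queue ↔ ReachN N start x := by
  intro fuel
  induction fuel with
  | zero =>
    intro searched found queue hnd hsu _ _ _ _ _ _ _ hfuel x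
    exfalso
    have hle : searched.length ≤ umis.length :=
      (List.subperm_of_subset hnd hsu).length_le
    omega
  | succ fuel ih =>
    intro searched found queue hnd hsu hqu hdisj hreach hstart hfsq hsqf hclosed hfuel x
    cases hq : queue with
    | nil =>
      subst hq
      simp only [bfsLoop]
      constructor
      · exact fun h => hreach x h
      · intro h
        induction h with
        | refl => exact hstart
        | tail _ hbc ihb =>
          rename_i b c _
          have hb : b ∈ searched := by
            rcases hfsq b ihb with h' | h'
            · exact h'
            · simp at h'
          exact hclosed b hb c hbc
    | cons node rest =>
      subst hq
      have hnq : node ∈ node :: rest := List.mem_cons_self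
      have hnu : node ∈ umis := hqu node hnq
      have hnsearched : node ∉ searched := fun hs => hdisj node hs hnq
      have hnfound : node ∈ found := hsqf node (Or.inr hnq)
      have hreach_node : ReachN N start node := hreach node hnfound
      simp only [bfsLoop, hadj node hnu]
      have hlen : (PySem.Set.add searched node).length = searched.length + 1 := by
        rw [PySem.Set.add_of_not_mem hnsearched, List.length_append]; rfl
      refine ih (PySem.Set.add searched node) (PySem.Set.update found (N node))
        (PySem.Set.diff (PySem.Set.update (node :: rest) (N node)) (PySem.Set.add searched node))
        (PySem.Set.nodup_add _ _ hnd) ?_ ?_ ?_ ?_ ?_ ?_ ?_ ?_ (by omega) x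
      · intro y hy
        rcases (PySem.Set.mem_add _ _ _).mp hy with h' | h'
        · exact hsu y h'
        · exact h' ▸ hnu
      · intro y hy
        rcases (PySem.Set.mem_update _ _ _).mp ((PySem.Set.mem_diff _ _ _).mp hy).1 with h' | h'
        · exact hqu y h'
        · exact hNsub node y h'
      · intro y hy
        exact fun hmem => ((PySem.Set.mem_diff _ _ _).mp hmem).2 hy
      · intro y hy
        rcases (PySem.Set.mem_update _ _ _).mp hy with h' | h'
        · exact hreach y h'
        · exact Relation.ReflTransGen.tail hreach_node h'
      · exact (PySem.Set.mem_update _ _ _).mpr (Or.inl hstart)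
      · intro y hy
        rcases (PySem.Set.mem_update _ _ _).mp hy with h' | h'
        · rcases hfsq y h' with h'' | h''
          · exact Or.inl ((PySem.Set.mem_add _ _ _).mpr (Or.inl h''))
          · by_cases hys : y ∈ PySem.Set.add searched node
            · exact Or.inl hys
            · exact Or.inr ((PySem.Set.mem_diff _ _ _).mpr
                ⟨(PySem.Set.mem_update _ _ _).mpr (Or.inl h''), hys⟩)
        · by_cases hys : y ∈ PySem.Set.add searched node
          · exact Or.inl hys
          · exact Or.inr ((PySem.Set.mem_diff _ _ _).mpr
              ⟨(PySem.Set.mem_update _ _ _).mpr (Or.inr h'), hys⟩)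
      · intro y hy
        rcases hy with h' | h'
        · rcases (PySem.Set.mem_add _ _ _).mp h' with h'' | h''
          · exact (PySem.Set.mem_update _ _ _).mpr (Or.inl (hsqf y (Or.inl h'')))
          · exact (PySem.Set.mem_update _ _ _).mpr (Or.inl (h'' ▸ hnfound))
        · rcases (PySem.Set.mem_update _ _ _).mp ((PySem.Set.mem_diff _ _ _).mp h').1 with h'' | h''
          · exact (PySem.Set.mem_update _ _ _).mpr (Or.inl (hsqf y (Or.inr h'')))
          · exact (PySem.Set.mem_update _ _ _).mpr (Or.inr h'')
      · intro y hy z hz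
        rcases (PySem.Set.mem_add _ _ _).mp hy with h' | h'
        · exact (PySem.Set.mem_update _ _ _).mpr (Or.inl (hclosed y h' z hz))
        · exact (PySem.Set.mem_update _ _ _).mpr (Or.inr (h' ▸ hz))

-- WP with no allowed interior: exactly "equal or a single edge"
theorem WP_nil_iff (E : String → String → Prop) (u v : String) :
    WP E [] u v ↔ u = v ∨ E u v := by
  constructor
  · intro h
    cases h with
    | refl => exact Or.inl rfl
    | last _ _ hE => exact Or.inr hE
    | cons _ w _ _ hw _ => simp at hw
  · rintro (rfl | hE)
    · exact WP.refl u
    · exact WP.last u v hE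

-- WP is monotone in the allowed-interior list
theorem WP_mono (E : String → String → Prop) (K1 K2 : List String)
    (h : ∀ x ∈ K1, x ∈ K2) {u v : String} (hp : WP E K1 u v) : WP E K2 u v := by
  induction hp with
  | refl u => exact WP.refl u
  | last u v hE => exact WP.last u v hE
  | cons u w v hE hw _ ih => exact WP.cons u w v hE (h w hw) ih

theorem WP_iff_congr (E : String → String → Prop) (K1 K2 : List String)
    (h : ∀ x, x ∈ K1 ↔ x ∈ K2) (u v : String) : WP E K1 u v ↔ WP E K2 u v :=
  ⟨WP_mono E K1 K2 (fun x hx => (h x).mp hx), WP_mono E K2 K1 (fun x hx => (h x).mpr hx)⟩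

-- concatenation of interior-restricted paths through an allowed vertex
theorem WP_trans_mem (E : String → String → Prop) (K : List String) (k : String) (hk : k ∈ K) :
    ∀ {u v : String}, WP E K u k → WP E K k v → WP E K u v := by
  intro u v h1
  induction h1 with
  | refl a => exact id
  | last a b hE =>
    intro h2
    cases h2 with
    | refl => exact WP.last a _ hE
    | last _ _ hE2 => exact WP.cons a _ _ hE hk (WP.last _ _ hE2)
    | cons _ w _ hE2 hw hp => exact WP.cons a _ _ hE hk (WP.cons _ w _ hE2 hw hp)
  | cons a w b hE hw hp ih =>
    intro h2
    exact WP.cons a w _ hE hw (ih hk h2)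

-- Warshall's recurrence
theorem WP_cons_iff (E : String → String → Prop) (K : List String) (k u v : String) :
    WP E (k :: K) u v ↔ WP E K u v ∨ (WP E K u k ∧ WP E K k v) := by
  constructor
  · intro h
    induction h with
    | refl u => exact Or.inl (WP.refl u)
    | last u v hE => exact Or.inl (WP.last u v hE)
    | cons u w v hE hw _ ih =>
      rcases List.mem_cons.mp hw with rfl | hwK
      · rcases ih with h' | ⟨_, h2⟩
        · exact Or.inr ⟨WP.last u w hE, h'⟩
        · exact Or.inr ⟨WP.last u w hE, h2⟩
      · rcases ih with h' | ⟨h1, h2⟩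
        · exact Or.inl (WP.cons u w v hE hwK h')
        · exact Or.inr ⟨WP.cons u w k hE hwK h1, h2⟩
  · rintro (h | ⟨h1, h2⟩)
    · exact WP_mono E K (k :: K) (fun x hx => List.mem_cons_of_mem k hx) h
    · exact WP_trans_mem E (k :: K) k List.mem_cons_self
        (WP_mono E K (k :: K) (fun x hx => List.mem_cons_of_mem k hx) h1)
        (WP_mono E K (k :: K) (fun x hx => List.mem_cons_of_mem k hx) h2)

-- appending one edge whose source is allowed (or is the path's start)
theorem WP_append_edge (E : String → String → Prop) (K : List String) {u b c : String}
    (h1 : WP E K u b) : (u = b ∨ b ∈ K) → E b c → WP E K u c := by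
  induction h1 with
  | refl a => exact fun _ hE => WP.last a c hE
  | last a b' hE1 =>
    intro hb hE
    rcases hb with rfl | hbK
    · exact WP.last _ c hE
    · exact WP.cons a b' c hE1 hbK (WP.last b' c hE)
  | cons a w b' hE1 hw hp ih =>
    intro hb hE
    rcases hb with rfl | hbK
    · exact WP.last _ c hE
    · exact WP.cons a w c hE1 hw (ih (Or.inr hbK) hE)

-- WP over the whole vertex list is plain reachability (edges land in umis)
theorem WP_umis_iff (N : String → List String) (umis : List String)
    (hNsub : ∀ u, ∀ v ∈ N u, v ∈ umis) (u v : String) :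
    WP (fun a b => b ∈ N a) umis u v ↔ ReachN N u v := by
  constructor
  · intro h
    induction h with
    | refl a => exact Relation.ReflTransGen.refl
    | last a b hE => exact Relation.ReflTransGen.single hE
    | cons a w b hE _ _ ih => exact Relation.ReflTransGen.head hE ih
  · intro h
    induction h with
    | refl => exact WP.refl u
    | tail hab hbc ihb =>
      rename_i b c
      refine WP_append_edge _ umis ihb ?_ hbc
      cases hab with
      | refl => exact Or.inl rfl
      | tail _ h2 => exact Or.inr (hNsub _ _ h2)

-- the rows of B's initial matrix: equal-or-one-edge
theorem mem_bInit (d : PySem.Dict String Int) (umis : List String) (hnd : umis.Nodup)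
    (u : String) (hu : u ∈ umis) (x : String) :
    x ∈ (bInit d umis).getD u PySem.Set.empty ↔
      WP (fun a b => b ∈ umis.filter (fun v => aAdjPred d a v)) [] u x := by
  unfold bInit
  rw [getD_foldl_insert_mem
    (fun u => PySem.Set.union (PySem.Set.add PySem.Set.empty u)
      (PySem.Set.ofList (umis.filter (fun v => bNear d u v))))
    PySem.Set.empty umis _ u hnd hu, WP_nil_iff]
  have hfe : umis.filter (fun v => bNear d u v) = umis.filter (fun v => aAdjPred d u v) :=
    List.filter_congr (fun v _ => bNear_eq_aAdjPred d u v)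
  rw [PySem.Set.mem_union, PySem.Set.mem_ofList, hfe, PySem.Set.mem_add]
  constructor
  · rintro ((h | rfl) | h)
    · simp [PySem.Set.empty] at h
    · exact Or.inl rfl
    · exact Or.inr h
  · rintro (rfl | h)
    · exact Or.inl (Or.inr rfl)
    · exact Or.inr h

-- B's inner loop performs one Warshall update on every row
theorem bInner_fold (E : String → String → Prop) (K : List String) (k : String)
    (rk : PySem.Set String) (hrk : ∀ x, x ∈ rk ↔ WP E K k x) (us : List String) :
    ∀ (r : PySem.Dict String (PySem.Set String)), us.Nodup →
    (∀ u ∈ us, ∀ x, x ∈ r.getD u PySem.Set.empty ↔ WP E K u x) →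
    (∀ u ∈ us, ∀ x,
      x ∈ (us.foldl (fun r u =>
          if k ∈ r.getD u PySem.Set.empty then
            r.insert u (PySem.Set.union (r.getD u PySem.Set.empty) rk)
          else r) r).getD u PySem.Set.empty ↔
        (WP E K u x ∨ (WP E K u k ∧ WP E K k x))) ∧
    (∀ u, u ∉ us →
      (us.foldl (fun r u =>
          if k ∈ r.getD u PySem.Set.empty then
            r.insert u (PySem.Set.union (r.getD u PySem.Set.empty) rk)
          else r) r).getD u PySem.Set.empty = r.getD u PySem.Set.empty) := by
  induction us with
  | nil => intro r _ _; exact ⟨fun u hu => by simp at hu, fun u _ => rfl⟩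
  | cons u0 rest ih =>
    intro r hnd hinv
    simp only [List.nodup_cons] at hnd
    -- state after the step on u0
    set r' := if k ∈ r.getD u0 PySem.Set.empty then
        r.insert u0 (PySem.Set.union (r.getD u0 PySem.Set.empty) rk)
      else r with hr'
    have hother : ∀ u, u ≠ u0 → r'.getD u PySem.Set.empty = r.getD u PySem.Set.empty := by
      intro u hne
      rw [hr']
      split
      · exact PySem.Dict.getD_insert_of_ne (hne := hne) ..
      · rfl
    have hu0 : ∀ x, x ∈ r'.getD u0 PySem.Set.empty ↔
        (WP E K u0 x ∨ (WP E K u0 k ∧ WP E K k x)) := by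
      intro x
      rw [hr']
      by_cases hkin : k ∈ r.getD u0 PySem.Set.empty
      · have hk : WP E K u0 k := (hinv u0 List.mem_cons_self k).mp hkin
        rw [if_pos hkin, PySem.Dict.getD_insert_self, PySem.Set.mem_union,
          hinv u0 List.mem_cons_self x, hrk x]
        constructor
        · rintro (h | h)
          · exact Or.inl h
          · exact Or.inr ⟨hk, h⟩
        · rintro (h | ⟨_, h⟩)
          · exact Or.inl h
          · exact Or.inr h
      · have hk : ¬ WP E K u0 k := fun h => hkin ((hinv u0 List.mem_cons_self k).mpr h)
        rw [if_neg hkin, hinv u0 List.mem_cons_self x]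
        constructor
        · exact Or.inl
        · rintro (h | ⟨h, _⟩)
          · exact h
          · exact absurd h hk
    have hinv' : ∀ u ∈ rest, ∀ x, x ∈ r'.getD u PySem.Set.empty ↔ WP E K u x := by
      intro u hu x
      rw [hother u (fun h => hnd.1 (h ▸ hu))]
      exact hinv u (List.mem_cons_of_mem u0 hu) x
    obtain ⟨ihmem, ihun⟩ := ih r' hnd.2 hinv'
    constructor
    · intro u hu x
      simp only [List.foldl_cons, ← hr']
      rcases List.mem_cons.mp hu with rfl | hur
      · rw [ihun u hnd.1]; exact hu0 x
      · exact ihmem u hur x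
    · intro u hu
      simp only [List.mem_cons, not_or] at hu
      simp only [List.foldl_cons, ← hr']
      rw [ihun u hu.2]
      exact hother u hu.1

-- B's outer loop: Warshall over the processed prefix
theorem warshall_fold (E : String → String → Prop) (umis : List String) (hnd : umis.Nodup) :
    ∀ (ks : List String) (K : List String) (r : PySem.Dict String (PySem.Set String)),
    (∀ k ∈ ks, k ∈ umis) →
    (∀ u ∈ umis, ∀ x, x ∈ r.getD u PySem.Set.empty ↔ WP E K u x) →
    ∀ u ∈ umis, ∀ x,
      x ∈ (ks.foldl (fun r k => bInner umis k (r.getD k PySem.Set.empty) r) r).getD u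
          PySem.Set.empty ↔ WP E (ks ++ K) u x := by
  intro ks
  induction ks with
  | nil => intro K r _ hinv u hu x; simpa using hinv u hu x
  | cons k rest ih =>
    intro K r hks hinv u hu x
    have hkum : k ∈ umis := hks k List.mem_cons_self
    have hrk : ∀ x, x ∈ r.getD k PySem.Set.empty ↔ WP E K k x := hinv k hkum
    obtain ⟨hmem, _⟩ := bInner_fold E K k (r.getD k PySem.Set.empty) hrk umis r hnd hinv
    have hinv' : ∀ u ∈ umis, ∀ x,
        x ∈ (bInner umis k (r.getD k PySem.Set.empty) r).getD u PySem.Set.empty ↔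
          WP E (k :: K) u x := by
      intro u hu x
      unfold bInner
      rw [hmem u hu x, WP_cons_iff]
    simp only [List.foldl_cons]
    exact Iff.trans (ih (k :: K) _ (fun k' hk' => hks k' (List.mem_cons_of_mem k hk')) hinv' u hu x)
      (WP_iff_congr E _ _ (fun y => by simp [List.mem_append, List.mem_cons]; tauto) u x)

-- the outer loops produce equal component lists from membership-equal component sets
theorem foldl_components_congr (umis : List String) (cA cB : String → PySem.Set String) :
    ∀ (nodes : List String) (accA accB : List (List String) × PySem.Set String),
    (∀ s ∈ nodes, ∀ x, x ∈ cA s ↔ x ∈ cB s) →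
    accA.1 = accB.1 → (∀ x, x ∈ accA.2 ↔ x ∈ accB.2) →
    (nodes.foldl (fun acc node => if node ∈ acc.2 then acc else
        (acc.1 ++ [umis.filter (fun x => decide (x ∈ cA node))], PySem.Set.update acc.2 (cA node))) accA).1
    = (nodes.foldl (fun acc node => if node ∈ acc.2 then acc else
        (acc.1 ++ [umis.filter (fun x => decide (x ∈ cB node))], PySem.Set.update acc.2 (cB node))) accB).1 := by
  intro nodes
  induction nodes with
  | nil => intro accA accB _ h1 _; exact h1
  | cons node rest ih =>
    intro accA accB hc h1 h2
    simp only [List.foldl_cons]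
    by_cases hn : node ∈ accA.2
    · rw [if_pos hn, if_pos ((h2 node).mp hn)]
      exact ih _ _ (fun s hs => hc s (List.mem_cons_of_mem node hs)) h1 h2
    · rw [if_neg hn, if_neg (fun h => hn ((h2 node).mpr h))]
      refine ih _ _ (fun s hs => hc s (List.mem_cons_of_mem node hs)) ?_ ?_
      · simp only [h1]
        congr 1
        exact congrArg (fun l => [l]) (List.filter_congr (fun x _ => by
          simp only [decide_eq_decide]
          exact hc node List.mem_cons_self x))
      · intro x
        simp only [PySem.Set.mem_update]
        rw [h2 x]
        exact or_congr_right (hc node List.mem_cons_self x)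

-- the component-list computation, over an arbitrary dict with distinct keys
theorem components_eq_aux (d : PySem.Dict String Int) (hnd : d.keys.Nodup) :
    (List.foldl (fun (acc : List (List String) × PySem.Set String) node =>
        if node ∈ acc.2 then acc else
          (acc.1 ++ [List.filter (fun x => decide (x ∈ breadth_first_search node
              (List.foldl (fun g u => g.insert u (List.filter (fun v => aAdjPred d u v) d.keys))
                PySem.Dict.empty d.keys) (d.keys.length + 1))) d.keys],
            PySem.Set.update acc.2 (breadth_first_search node
              (List.foldl (fun g u => g.insert u (List.filter (fun v => aAdjPred d u v) d.keys))
                PySem.Dict.empty d.keys) (d.keys.length + 1))))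
      ([], PySem.Set.empty)
      (PySem.List.sorted (List.foldl (fun g u => g.insert u (List.filter (fun v => aAdjPred d u v) d.keys))
          PySem.Dict.empty d.keys).keys (fun x => d.getD x 0) true)).1
    = (List.foldl (fun (acc : List (List String) × PySem.Set String) seed =>
        if seed ∈ acc.2 then acc else
          (acc.1 ++ [List.filter (fun x => decide (x ∈ (List.foldl
              (fun r k => bInner d.keys k (r.getD k PySem.Set.empty) r) (bInit d d.keys)
              d.keys).getD seed PySem.Set.empty)) d.keys],
            PySem.Set.update acc.2 ((List.foldl
              (fun r k => bInner d.keys k (r.getD k PySem.Set.empty) r) (bInit d d.keys)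
              d.keys).getD seed PySem.Set.empty)))
      ([], PySem.Set.empty)
      (PySem.List.sorted d.keys (fun x => d.getD x 0) true)).1 := by
  have hkeys : (List.foldl (fun g u => g.insert u (List.filter (fun v => aAdjPred d u v) d.keys))
      PySem.Dict.empty d.keys).keys = d.keys := by
    rw [PySem.Dict.keys_foldl_insert, PySem.Dict.keys_empty,
      PySem.Set.update_nil_left, PySem.Set.ofList_eq_self_of_nodup d.keys hnd]
  rw [hkeys]
  have hadj : ∀ u ∈ d.keys,
      (List.foldl (fun g u => g.insert u (List.filter (fun v => aAdjPred d u v) d.keys))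
        PySem.Dict.empty d.keys).getD u [] = d.keys.filter (fun v => aAdjPred d u v) :=
    fun u hu => getD_foldl_insert_mem (fun u => d.keys.filter (fun v => aAdjPred d u v)) [] d.keys _ u hnd hu
  have hNsub : ∀ u, ∀ v ∈ d.keys.filter (fun v => aAdjPred d u v), v ∈ d.keys :=
    fun u v hv => List.mem_of_mem_filter hv
  have hcomp : ∀ s ∈ d.keys, ∀ x,
      x ∈ breadth_first_search s
        (List.foldl (fun g u => g.insert u (List.filter (fun v => aAdjPred d u v) d.keys))
          PySem.Dict.empty d.keys) (d.keys.length + 1) ↔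
      x ∈ (List.foldl (fun r k => bInner d.keys k (r.getD k PySem.Set.empty) r) (bInit d d.keys)
          d.keys).getD s PySem.Set.empty := by
    intro s hs x
    have hA : x ∈ breadth_first_search s
        (List.foldl (fun g u => g.insert u (List.filter (fun v => aAdjPred d u v) d.keys))
          PySem.Dict.empty d.keys) (d.keys.length + 1) ↔
        ReachN (fun u => d.keys.filter (fun v => aAdjPred d u v)) s x := by
      unfold breadth_first_search
      refine bfsLoop_mem _ (fun u => d.keys.filter (fun v => aAdjPred d u v)) d.keys hadj hNsub s
        (d.keys.length + 1)
        PySem.Set.empty [s] [s] List.nodup_nil (by simp [PySem.Set.empty])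
        ?_ (by simp [PySem.Set.empty]) ?_ (List.mem_singleton.mpr rfl) ?_ ?_
        (by simp [PySem.Set.empty]) (by simp [PySem.Set.empty]) x
      · intro y hy; rwa [List.mem_singleton.mp hy]
      · intro y hy; rw [List.mem_singleton.mp hy]; exact Relation.ReflTransGen.refl
      · intro y hy; exact Or.inr hy
      · intro y hy
        rcases hy with h | h
        · simp [PySem.Set.empty] at h
        · exact h
    have hB : x ∈ (List.foldl (fun r k => bInner d.keys k (r.getD k PySem.Set.empty) r)
        (bInit d d.keys) d.keys).getD s PySem.Set.empty ↔
        ReachN (fun u => d.keys.filter (fun v => aAdjPred d u v)) s x := by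
      rw [warshall_fold (fun a b => b ∈ d.keys.filter (fun v => aAdjPred d a v)) d.keys hnd
        d.keys [] (bInit d d.keys) (fun k hk => hk)
        (fun u hu x => mem_bInit d d.keys hnd u hu x) s hs x]
      rw [List.append_nil]
      exact WP_umis_iff (fun u => d.keys.filter (fun v => aAdjPred d u v)) d.keys hNsub s x
    rw [hA, hB]
  exact foldl_components_congr d.keys
    (fun s => breadth_first_search s
      (List.foldl (fun g u => g.insert u (List.filter (fun v => aAdjPred d u v) d.keys))
        PySem.Dict.empty d.keys) (d.keys.length + 1))
    (fun s => (List.foldl (fun r k => bInner d.keys k (r.getD k PySem.Set.empty) r)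
      (bInit d d.keys) d.keys).getD s PySem.Set.empty)
    (PySem.List.sorted d.keys (fun x => d.getD x 0) true) ([], PySem.Set.empty) ([], PySem.Set.empty)
    (fun s hs => hcomp s ((PySem.List.mem_sorted _ _ _ _).mp hs)) rfl (fun x => Iff.rfl)

-- the two programs agree
theorem dedup_dir_adj_eq (Counter : List (String × Int)) :
    dedup_dir_adj Counter = dedup_dir_adj_alt Counter := by
  unfold dedup_dir_adj dedup_dir_adj_alt
  exact components_eq_aux (PySem.Dict.ofList Counter) (PySem.Dict.nodup_keys_ofList Counter)

-- ===== VERDICT (by name: the statement is the Claim_ definition above) =====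
theorem dedup_dir_adj_spec : Claim_equal_dedup_dir_adj := by
  intro Counter _
  exact dedup_dir_adj_eq Counter
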